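-- pv_equiv track=rewrite | github.com/bobmcroy/card_shop | utils/io_utils.py | _collect_fieldnames
-- ===== SOURCE A (Python) =====
-- from typing import Any, Iterable, Mapping, Sequence
--
-- def _collect_fieldnames(
--     rows: Sequence[Mapping[str, Any]],
--     field_order: Sequence[str] | None = None,
-- ) -> list[str]:
--     if field_order:
--         return list(field_order)
--
--     seen: set[str] = set()
--     ordered: list[str] = []
--     for row in rows:
--         for key in row.keys():
--             if key not in seen:
--                 seen.add(key)
--                 ordered.append(str(key))
--     return ordered
-- ===== SOURCE B (Python) =====
-- def _collect_fieldnames(rows, field_order=None):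
--     if field_order:
--         return list(field_order)
--     keys = [k for row in rows for k in row.keys()]
--     ordered = []
--     while keys:
--         head = keys[0]
--         ordered.append(str(head))
--         keys = [k for k in keys if k != head]
--     return ordered
-- ===== Notes on version B (the rewrite author's own statement) =====
-- stated objective: alternative
-- what changed: Replaces A's single pass with a seen-set by a repeated-filtering loop: flatten all keys, then repeatedly emit the first remaining key and filter out every occurrence of it, so no membership structure is maintained.
import Mathlib
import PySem

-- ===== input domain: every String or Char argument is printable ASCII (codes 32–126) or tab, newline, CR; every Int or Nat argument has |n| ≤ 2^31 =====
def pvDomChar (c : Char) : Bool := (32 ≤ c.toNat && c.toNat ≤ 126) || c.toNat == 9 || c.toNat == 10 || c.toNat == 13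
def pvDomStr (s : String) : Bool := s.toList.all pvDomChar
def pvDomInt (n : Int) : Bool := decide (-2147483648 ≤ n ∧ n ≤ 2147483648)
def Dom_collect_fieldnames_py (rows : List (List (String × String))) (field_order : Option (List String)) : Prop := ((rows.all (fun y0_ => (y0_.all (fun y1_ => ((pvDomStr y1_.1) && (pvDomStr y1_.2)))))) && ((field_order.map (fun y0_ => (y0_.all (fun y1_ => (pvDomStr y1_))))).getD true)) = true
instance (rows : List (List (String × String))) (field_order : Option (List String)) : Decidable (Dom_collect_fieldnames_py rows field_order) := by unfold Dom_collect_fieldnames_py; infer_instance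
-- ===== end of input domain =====

-- ===== PORT A =====
-- B replaces A's single seen-set pass by a repeated-filtering loop (select first
-- remaining key, filter out all its occurrences, repeat); return-value equivalence proved.
-- Port of A: the `if field_order:` truthiness guard, then the nested loop with a seen
-- set and an ordered accumulator; str(key) is the identity on String keys (exact).
def collect_fieldnames_py (rows : List (List (String × String))) (field_order : Option (List String)) : List String :=
  match field_order with
  | some (f :: fs) => f :: fs   -- `if field_order: return list(field_order)`
  | _ =>
    (rows.foldl (fun (st : PySem.Set String × List String) row =>
      row.foldl (fun (st : PySem.Set String × List String) kv =>
        if PySem.Set.contains st.1 kv.1 then st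
        else (PySem.Set.add st.1 kv.1, st.2 ++ [kv.1])) st)
      (PySem.Set.empty, [])).2

-- ===== PORT B =====
-- B's while-loop: emit keys[0], then keys = [k for k in keys if k != head]; since
-- keys[0] = head, filtering the whole list equals filtering the tail (exact).
def cfFilterLoop : List String → List String
  | [] => []
  | head :: rest => head :: cfFilterLoop (rest.filter (fun k => k ≠ head))
termination_by keys => keys.length
decreasing_by
  simpa using Nat.lt_succ_of_le ((List.length_filter_le _ rest.attach).trans (by simp))

-- Port of B: flatten all keys across rows, then the repeated-filtering loop;
-- str(head) is the identity on String keys (exact).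
def collect_fieldnames_py_alt (rows : List (List (String × String))) (field_order : Option (List String)) : List String :=
  let fo := field_order.getD []
  if fo ≠ [] then fo   -- `if field_order: return list(field_order)` (truthy = some nonempty list)
  else
    cfFilterLoop (rows.flatMap (fun row => row.map Prod.fst))

-- ===== PRECONDITION & SPEC =====
def Spec_collect_fieldnames_py (rows : List (List (String × String))) (field_order : Option (List String)) (out : List String) : Prop := out = collect_fieldnames_py_alt rows field_order
instance (rows : List (List (String × String))) (field_order : Option (List String)) (out : List String) : Decidable (Spec_collect_fieldnames_py rows field_order out) := by unfold Spec_collect_fieldnames_py; infer_instance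

-- ===== CLAIM (what is proved, stated in full; the proofs are below) =====
def Claim_equal_collect_fieldnames_py : Prop := ∀ (rows : List (List (String × String))) (field_order : Option (List String)), Dom_collect_fieldnames_py rows field_order → Spec_collect_fieldnames_py rows field_order (collect_fieldnames_py rows field_order)

-- ===== LEMMAS AND PROOFS =====
-- A's inner loop on a diagonal state (seen = ordered) stays diagonal and is the
-- Set.add fold over the row's keys.
theorem cf_inner_diag (l : List (String × String)) (s : PySem.Set String) :
    l.foldl (fun (st : PySem.Set String × List String) kv =>
        if PySem.Set.contains st.1 kv.1 then st
        else (PySem.Set.add st.1 kv.1, st.2 ++ [kv.1])) (s, s)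
      = ((l.map Prod.fst).foldl PySem.Set.add s, (l.map Prod.fst).foldl PySem.Set.add s) := by
  induction l generalizing s with
  | nil => rfl
  | cons kv t ih =>
    simp only [List.foldl_cons, List.map_cons]
    by_cases h : PySem.Set.contains s kv.1 = true
    · rw [if_pos h, show PySem.Set.add s kv.1 = s from by simp only [PySem.Set.add]; rw [if_pos h]]
      exact ih s
    · rw [if_neg h, show PySem.Set.add s kv.1 = s ++ [kv.1] from by simp only [PySem.Set.add]; rw [if_neg h]]
      exact ih (s ++ [kv.1])

-- A's outer loop from a diagonal state is the Set.add fold over all flattened keys.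
theorem cf_outer_diag (rows : List (List (String × String))) (s : PySem.Set String) :
    rows.foldl (fun (st : PySem.Set String × List String) row =>
        row.foldl (fun (st : PySem.Set String × List String) kv =>
          if PySem.Set.contains st.1 kv.1 then st
          else (PySem.Set.add st.1 kv.1, st.2 ++ [kv.1])) st) (s, s)
      = (((rows.flatMap (fun row => row.map Prod.fst)).foldl PySem.Set.add s),
         ((rows.flatMap (fun row => row.map Prod.fst)).foldl PySem.Set.add s)) := by
  induction rows generalizing s with
  | nil => rfl
  | cons row t ih =>
    simp only [List.foldl_cons, List.flatMap_cons, List.foldl_append, cf_inner_diag]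
    exact ih _

-- The Set.add fold over l starting from s appends exactly the filter-loop output
-- of l with s's elements pre-removed.
theorem cf_fold_eq_filterLoop (l : List String) (s : PySem.Set String) :
    l.foldl PySem.Set.add s = s ++ cfFilterLoop (l.filter (fun k => !(PySem.Set.contains s k))) := by
  induction l generalizing s with
  | nil => rw [List.filter_nil, cfFilterLoop]; simp
  | cons h t ih =>
    simp only [List.foldl_cons, List.filter_cons]
    by_cases hc : PySem.Set.contains s h = true
    · rw [show PySem.Set.add s h = s from by simp only [PySem.Set.add]; rw [if_pos hc]]
      simp only [hc, Bool.not_true, Bool.false_eq_true, if_false]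
      exact ih s
    · rw [show PySem.Set.add s h = s ++ [h] from by simp only [PySem.Set.add]; rw [if_neg hc]]
      rw [ih (s ++ [h])]
      have hfe : t.filter (fun k => !(PySem.Set.contains (s ++ [h]) k))
          = (t.filter (fun k => !(PySem.Set.contains s k))).filter (fun k => k ≠ h) := by
        rw [List.filter_filter]
        apply List.filter_congr
        intro k _
        simp only [PySem.Set.contains, List.contains_append]
        cases hsk : (s : List String).contains k <;> simp [eq_comm, Bool.and_comm]
      simp only [Bool.not_eq_true] at hc
      simp only [hc, Bool.not_false, if_true]
      rw [hfe, List.append_assoc]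
      congr 1
      rw [cfFilterLoop]
      rfl

-- ===== VERDICT (by name: the statement is the Claim_ definition above) =====
theorem collect_fieldnames_py_spec : Claim_equal_collect_fieldnames_py := by
  intro rows field_order _
  unfold Spec_collect_fieldnames_py collect_fieldnames_py collect_fieldnames_py_alt
  match field_order with
  | some (f :: fs) => simp
  | some [] | none =>
    simp only [Option.getD, ne_eq, not_true_eq_false, if_false]
    rw [show (rows.foldl (fun (st : PySem.Set String × List String) row =>
      row.foldl (fun (st : PySem.Set String × List String) kv =>
        if PySem.Set.contains st.1 kv.1 then st
        else (PySem.Set.add st.1 kv.1, st.2 ++ [kv.1])) st)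
      (PySem.Set.empty, ([] : List String))) = _ from cf_outer_diag rows PySem.Set.empty]
    rw [cf_fold_eq_filterLoop]
    simp [PySem.Set.empty, PySem.Set.contains]
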